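-- pv_equiv track=rewrite | github.com/nakfoury/aoc2020 | solutions.py | day6
-- ===== SOURCE A (Python) =====
-- def day6(inp, b=False):
--     result, p = 0, 0
--     f = set.union if not b else set.intersection
--     inp.append('')
--     g = (i for i, e in enumerate(inp) if e == '')
--     for n in g:
--         group = list(map(set, inp[p:n]))
--         result += len(f(*group))
--         p = n + 1
--     return result
-- ===== SOURCE B (Python) =====
-- def day6(inp, b=False):
--     combine = set.union if not b else set.intersection
--     inp.append('')
--     total = 0
--     cur = None
--     for line in inp:
--         if line == '':
--             total += len(cur)
--             cur = None
--         else: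
--             cur = set(line) if cur is None else combine(cur, set(line))
--     return total
-- ===== Notes on version B (the rewrite author's own statement) =====
-- stated objective: simpler
-- what changed: Replaces the enumerate-blank-indices generator plus repeated list slicing (and the per-group list of sets passed to f(*group)) by one streaming pass that combines each line's character set into a running set and flushes its size at every blank line.
import Mathlib
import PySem

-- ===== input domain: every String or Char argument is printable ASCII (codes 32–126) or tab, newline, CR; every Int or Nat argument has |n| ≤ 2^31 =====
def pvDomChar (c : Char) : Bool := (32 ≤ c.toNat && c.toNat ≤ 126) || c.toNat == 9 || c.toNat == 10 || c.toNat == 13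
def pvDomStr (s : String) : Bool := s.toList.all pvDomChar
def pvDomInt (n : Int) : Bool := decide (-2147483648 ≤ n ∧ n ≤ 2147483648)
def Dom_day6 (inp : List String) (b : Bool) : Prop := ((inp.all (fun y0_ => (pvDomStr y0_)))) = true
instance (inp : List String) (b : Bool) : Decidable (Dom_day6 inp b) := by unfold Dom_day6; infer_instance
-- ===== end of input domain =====

-- B is a single streaming pass combining each line's character set into a running set,
-- instead of A's enumerate-blank-indices generator with list slicing; objective: simpler.
-- Both A and B mutate the argument (inp.append('')); the equivalence is about the return value.

-- ===== PORT A =====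
-- f = set.union if not b else set.intersection
def pvComb (b : Bool) (s t : PySem.Set Char) : PySem.Set Char :=
  if !b then PySem.Set.union s t else PySem.Set.inter s t

-- f(*group): Python raises TypeError on an empty group (excluded by Pre_day6)
def pvCombStar (b : Bool) (group : List (PySem.Set Char)) : PySem.Set Char :=
  match group with
  | [] => []          -- TypeError in Python; unreachable under Pre_day6
  | h :: t => t.foldl (pvComb b) h

def day6 (inp : List String) (b : Bool) : Int :=
  let inp' := inp ++ [""]
  let g : List Int := (PySem.List.enumerate inp').filterMap
      (fun p => if p.2 = "" then some p.1 else none)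
  (g.foldl (fun (st : Int × Int) n =>
      let group := (PySem.List.slice inp' (some st.2) (some n)).map
        (fun s => PySem.Set.ofList s.toList)
      (st.1 + PySem.Set.len (pvCombStar b group), n + 1)) (0, 0)).1

-- ===== PORT B =====
def day6_alt (inp : List String) (b : Bool) : Int :=
  ((inp ++ [""]).foldl (fun (st : Int × Option (PySem.Set Char)) line =>
      if line = "" then
        -- len(cur): Python raises TypeError when cur is None (excluded by Pre_day6)
        (st.1 + (st.2.map PySem.Set.len).getD 0, none)
      else
        (st.1, some (match st.2 with
                     | none => PySem.Set.ofList line.toList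
                     | some c => pvComb b c (PySem.Set.ofList line.toList))))
    ((0 : Int), (none : Option (PySem.Set Char)))).1

-- ===== PRECONDITION & SPEC =====
-- Pre_ excludes exactly the inputs where A raises TypeError (set.union()/set.intersection()
-- with no arguments): an empty list, a leading or trailing blank line, or two adjacent blank
-- lines, i.e. any empty group.  B raises TypeError there too.
def Pre_day6 (inp : List String) (b : Bool) : Prop :=
  inp ≠ [] ∧ inp.head? ≠ some "" ∧ inp.getLast? ≠ some "" ∧
  List.IsChain (fun a c => ¬(a = "" ∧ c = "")) inp
instance (inp : List String) (b : Bool) : Decidable (Pre_day6 inp b) := by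
  unfold Pre_day6; infer_instance

def pvWitness_day6 : List String × Bool := (["abc", "bc", "", "a"], false)

def Spec_day6 (inp : List String) (b : Bool) (out : Int) : Prop := out = day6_alt inp b
instance (inp : List String) (b : Bool) (out : Int) : Decidable (Spec_day6 inp b out) := by
  unfold Spec_day6; infer_instance

-- ===== CLAIM (what is proved, stated in full; the proofs are below) =====
def Claim_equal_day6 : Prop := ∀ (inp : List String) (b : Bool),
  Dom_day6 inp b → Pre_day6 inp b → Spec_day6 inp b (day6 inp b)

-- ===== LEMMAS AND PROOFS =====

-- helper abbreviations for the proofs (ports are unfolded to these by rfl-lemmas below)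
def lineSet (s : String) : PySem.Set Char := PySem.Set.ofList s.toList

def blanksFrom (xs : List String) (s : Int) : List Int :=
  (PySem.List.enumerate xs s).filterMap (fun p => if p.2 = "" then some p.1 else none)

def pvAstep (b : Bool) (xs : List String) (st : Int × Int) (n : Int) : Int × Int :=
  let group := (PySem.List.slice xs (some st.2) (some n)).map (fun s => lineSet s)
  (st.1 + PySem.Set.len (pvCombStar b group), n + 1)

def pvBstep (b : Bool) (st : Int × Option (PySem.Set Char)) (line : String) :
    Int × Option (PySem.Set Char) :=
  if line = "" then
    (st.1 + (st.2.map PySem.Set.len).getD 0, none)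
  else
    (st.1, some (match st.2 with
                 | none => lineSet line
                 | some c => pvComb b c (lineSet line)))

def flatG (gs : List (List String)) : List String := (gs.map (fun g => g ++ [""])).flatten

def szG (b : Bool) (g : List String) : Int := PySem.Set.len (pvCombStar b (g.map lineSet))

def sumG (b : Bool) (gs : List (List String)) : Int := (gs.map (szG b)).sum

theorem day6_eq (inp : List String) (b : Bool) :
    day6 inp b
      = ((blanksFrom (inp ++ [""]) 0).foldl (pvAstep b (inp ++ [""])) (0, 0)).1 := rfl

theorem day6_alt_eq (inp : List String) (b : Bool) :
    day6_alt inp b = ((inp ++ [""]).foldl (pvBstep b) (0, none)).1 := rfl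

theorem blanksFrom_nil (s : Int) : blanksFrom [] s = [] := rfl

theorem blanksFrom_cons (x : String) (xs : List String) (s : Int) :
    blanksFrom (x :: xs) s = (if x = "" then [s] else []) ++ blanksFrom xs (s + 1) := by
  simp only [blanksFrom, PySem.List.enumerate_cons, List.filterMap_cons]
  split <;> simp_all

theorem blanksFrom_append (u v : List String) (s : Int) :
    blanksFrom (u ++ v) s = blanksFrom u s ++ blanksFrom v (s + u.length) := by
  simp [blanksFrom, PySem.List.enumerate_append, List.filterMap_append]

theorem blanksFrom_noblank (u : List String) (s : Int) (h : "" ∉ u) :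
    blanksFrom u s = [] := by
  induction u generalizing s with
  | nil => rfl
  | cons x xs ih =>
    rw [blanksFrom_cons]
    have hx : ¬ x = "" := fun hx => h (by simp [hx])
    simp [hx, ih (s + 1) (fun hm => h (List.mem_cons_of_mem _ hm))]

theorem A_main (b : Bool) : ∀ (gs : List (List String)) (w : List String) (r : Int),
    (∀ g ∈ gs, "" ∉ g) →
    ((blanksFrom (flatG gs) (w.length : Int)).foldl
        (pvAstep b (w ++ flatG gs)) (r, (w.length : Int))).1 = r + sumG b gs := by
  intro gs
  induction gs with
  | nil => intro w r _; simp [flatG, sumG, blanksFrom_nil]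
  | cons g gs ih =>
    intro w r hgs
    have hnb : "" ∉ g := hgs g List.mem_cons_self
    have hflat : flatG (g :: gs) = (g ++ [""]) ++ flatG gs := by simp [flatG]
    rw [hflat, blanksFrom_append, blanksFrom_append,
        blanksFrom_noblank g _ hnb, blanksFrom_cons, blanksFrom_nil]
    simp only [reduceIte, List.nil_append, List.append_nil, List.singleton_append,
      List.foldl_cons]
    -- evaluate the first A-step: its slice is exactly the group g
    have hstep : pvAstep b (w ++ ((g ++ [""]) ++ flatG gs)) ((r, (w.length : Int)))
        ((w.length : Int) + (g.length : Int))
        = (r + szG b g, ((w.length : Int) + (g.length : Int)) + 1) := by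
      simp only [pvAstep, szG]
      have hsl : PySem.List.slice (w ++ ((g ++ [""]) ++ flatG gs))
          (some ((w.length : Nat) : Int)) (some (((w.length : Nat) : Int) + ((g.length : Nat) : Int)))
          = g := by
        rw [PySem.List.slice_natCast_add]
        rw [List.drop_left]
        rw [List.append_assoc, List.take_left]
      exact congrArg (fun l => (r + PySem.Set.len (pvCombStar b (l.map (fun s => lineSet s))), _)) hsl
    rw [hstep]
    have e1 : ((w.length : Int) + (g.length : Int)) + 1
        = (((w ++ (g ++ [""])).length : Nat) : Int) := by
      push_cast [List.length_append, List.length_cons, List.length_nil]; ring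
    have e2 : (w.length : Int) + (((g ++ [""]).length : Nat) : Int)
        = (((w ++ (g ++ [""])).length : Nat) : Int) := by
      push_cast [List.length_append, List.length_cons, List.length_nil]; ring
    have hxs : w ++ ((g ++ [""]) ++ flatG gs) = (w ++ (g ++ [""])) ++ flatG gs :=
      (List.append_assoc _ _ _).symm
    rw [e1, e2, hxs]
    rw [ih (w ++ (g ++ [""])) (r + szG b g) (fun g' hg' => hgs g' (List.mem_cons_of_mem _ hg'))]
    simp [sumG]; ring

theorem B_run (b : Bool) : ∀ (t : List String) (c : PySem.Set Char) (r : Int), "" ∉ t →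
    t.foldl (pvBstep b) (r, some c)
      = (r, some (t.foldl (fun c l => pvComb b c (lineSet l)) c)) := by
  intro t
  induction t with
  | nil => intro c r _; rfl
  | cons x xs ih =>
    intro c r hnb
    have hx : ¬ x = "" := fun hx => hnb (by simp [hx])
    simp only [List.foldl_cons, pvBstep, if_neg hx]
    exact ih _ r (fun hm => hnb (List.mem_cons_of_mem _ hm))

theorem B_main (b : Bool) : ∀ (gs : List (List String)) (r : Int),
    (∀ g ∈ gs, g ≠ [] ∧ "" ∉ g) →
    ((flatG gs).foldl (pvBstep b) (r, none)).1 = r + sumG b gs := by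
  intro gs
  induction gs with
  | nil => intro r _; simp [flatG, sumG]
  | cons g gs ih =>
    intro r hgs
    obtain ⟨hne, hnb⟩ := hgs g (List.mem_cons_self)
    obtain ⟨h, t, rfl⟩ : ∃ h t, g = h :: t := by
      cases g with
      | nil => exact absurd rfl hne
      | cons h t => exact ⟨h, t, rfl⟩
    have hflat : flatG ((h :: t) :: gs) = h :: (t ++ ("" :: flatG gs)) := by simp [flatG]
    have hh : ¬ h = "" := fun hx => hnb (by simp [hx])
    rw [hflat]
    simp only [List.foldl_cons, pvBstep, if_neg hh, List.foldl_append]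
    rw [B_run b t (lineSet h) r (fun hm => hnb (List.mem_cons_of_mem _ hm))]
    simp only [reduceIte, Option.map_some, Option.getD_some]
    rw [ih (r + _) (fun g' hg' => hgs g' (List.mem_cons_of_mem _ hg'))]
    have hsz : PySem.Set.len (t.foldl (fun c l => pvComb b c (lineSet l)) (lineSet h))
        = szG b (h :: t) := by
      simp [szG, pvCombStar, List.foldl_map]
    rw [hsz]
    simp [sumG, szG]; ring

theorem decomp : ∀ (n : Nat) (inp : List String), inp.length ≤ n → inp ≠ [] →
    inp.head? ≠ some "" → inp.getLast? ≠ some "" →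
    List.IsChain (fun a c => ¬(a = "" ∧ c = "")) inp →
    ∃ gs, (∀ g ∈ gs, g ≠ [] ∧ "" ∉ g) ∧ inp ++ [""] = flatG gs := by
  intro n
  induction n with
  | zero =>
    intro inp hlen hne _ _ _
    cases inp with
    | nil => exact absurd rfl hne
    | cons x xs => simp at hlen
  | succ n ih =>
    intro inp hlen hne hhd hlast hch
    by_cases hmem : "" ∈ inp
    · -- split at the first blank line
      have hnbu0 : "" ∉ inp.takeWhile (fun x => x ≠ "") := by
        intro hmu
        have := List.mem_takeWhile_imp hmu
        simp at this
      cases hd0 : inp.dropWhile (fun x => x ≠ "") with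
      | nil =>
        exfalso
        have hsplit : inp.takeWhile (fun x => x ≠ "") ++ inp.dropWhile (fun x => x ≠ "") = inp :=
          List.takeWhile_append_dropWhile
        rw [hd0, List.append_nil] at hsplit
        rw [← hsplit] at hmem
        exact hnbu0 hmem
      | cons x v =>
        have hx : x = "" := by
          have := List.head?_dropWhile_not (fun x : String => decide (x ≠ "")) inp
          rw [hd0] at this
          simpa using this
        subst hx
        obtain ⟨u, hsplit, hnbu⟩ : ∃ u, u ++ "" :: v = inp ∧ "" ∉ u := by
          refine ⟨inp.takeWhile (fun x => x ≠ ""), ?_, hnbu0⟩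
          rw [← hd0]
          exact List.takeWhile_append_dropWhile
        have hune : u ≠ [] := by
          intro h0
          rw [h0, List.nil_append] at hsplit
          rw [← hsplit] at hhd
          simp at hhd
        have hvlast : ("" :: v).getLast? = inp.getLast? := by
          rw [← hsplit]
          exact (List.getLast?_append_of_ne_nil u (by simp)).symm
        have hvne : v ≠ [] := by
          intro h0
          rw [h0] at hvlast
          rw [← hvlast] at hlast
          simp at hlast
        have hch2 : List.IsChain (fun a c => ¬(a = "" ∧ c = "")) ("" :: v) := by
          rw [← hsplit] at hch
          exact (List.isChain_append.mp hch).2.1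
        have hvhd : v.head? ≠ some "" := by
          intro h0
          have := (List.isChain_cons.mp hch2).1 "" (by simp [h0])
          simp at this
        have hvch : List.IsChain (fun a c => ¬(a = "" ∧ c = "")) v :=
          (List.isChain_cons.mp hch2).2
        have hvlast2 : v.getLast? ≠ some "" := by
          intro h0
          apply hlast
          rw [← hvlast]
          cases v with
          | nil => exact absurd rfl hvne
          | cons y ys => rw [List.getLast?_cons_cons]; exact h0
        have hvlen : v.length ≤ n := by
          have h1 : inp.length = u.length + (v.length + 1) := by
            rw [← hsplit]; simp
          have h2 : 1 ≤ u.length := by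
            cases u with
            | nil => exact absurd rfl hune
            | cons _ _ => simp
          omega
        obtain ⟨gs2, hgs2, hflat2⟩ := ih v hvlen hvne hvhd hvlast2 hvch
        refine ⟨u :: gs2, ?_, ?_⟩
        · intro g hg
          rcases List.mem_cons.mp hg with h0 | h0
          · exact h0 ▸ ⟨hune, hnbu⟩
          · exact hgs2 g h0
        · rw [← hsplit]
          simp only [flatG, List.map_cons, List.flatten_cons]
          rw [show (gs2.map (fun g => g ++ [""])).flatten = flatG gs2 from rfl, ← hflat2]
          simp
    · -- no blank line: a single group
      refine ⟨[inp], ?_, ?_⟩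
      · intro g hg
        simp only [List.mem_singleton] at hg
        exact hg ▸ ⟨hne, hmem⟩
      · simp [flatG]

-- ===== VERDICT (by name: the statement is the Claim_ definition above) =====
theorem day6_spec : Claim_equal_day6 := by
  intro inp b _ hpre
  obtain ⟨hne, hhd, hlast, hch⟩ := hpre
  obtain ⟨gs, hgs, hflat⟩ := decomp inp.length inp le_rfl hne hhd hlast hch
  unfold Spec_day6
  rw [day6_eq, day6_alt_eq, hflat]
  rw [B_main b gs 0 hgs]
  have h0 : (0 : Int) = ((([] : List String).length : Nat) : Int) := by simp
  have := A_main b gs [] 0 (fun g hg => (hgs g hg).2)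
  simpa using this
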